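-- pv_equiv track=rewrite | github.com/Snusmumriken12/Student_group_generator | app_streamlit.py | format_groups
-- ===== SOURCE A (Python) =====
-- def format_groups(groups: list[list[str]], generated_at: str | None) -> str:
--     if not groups:
--         return "No groups generated yet."
--
--     lines: list[str] = []
--     if generated_at:
--         lines.extend([f"Generated: {generated_at}", ""])
--
--     for index, group in enumerate(groups, start=1):
--         lines.append(f"Group {index}")
--         for student in group:
--             lines.append(f"- {student}")
--         lines.append("")
--
--     return "\n".join(lines).rstrip()
-- ===== SOURCE B (Python) =====
-- def format_groups(groups: list[list[str]], generated_at: str | None) -> str: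
--     if not groups:
--         return "No groups generated yet."
--
--     # Build the output back-to-front with a single string accumulator:
--     # walk the groups in reverse, concatenating each block directly
--     # (no intermediate list of lines, no join, no empty-string sentinel).
--     out = ""
--     for i in range(len(groups) - 1, -1, -1):
--         block = f"Group {i + 1}"
--         for student in groups[i]:
--             block += f"\n- {student}"
--         out = block if not out else f"{block}\n\n{out}"
--     if generated_at:
--         out = f"Generated: {generated_at}\n\n{out}"
--     return out.rstrip()
-- ===== Notes on version B (the rewrite author's own statement) =====
-- stated objective: alternative
-- what changed: B builds the result back-to-front: it iterates the group indices in reverse with a single string accumulator, concatenating each group's block directly onto the front (no intermediate list of lines, no join, no empty-string sentinel), then prepends the Generated header and rstrips.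
import Mathlib
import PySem

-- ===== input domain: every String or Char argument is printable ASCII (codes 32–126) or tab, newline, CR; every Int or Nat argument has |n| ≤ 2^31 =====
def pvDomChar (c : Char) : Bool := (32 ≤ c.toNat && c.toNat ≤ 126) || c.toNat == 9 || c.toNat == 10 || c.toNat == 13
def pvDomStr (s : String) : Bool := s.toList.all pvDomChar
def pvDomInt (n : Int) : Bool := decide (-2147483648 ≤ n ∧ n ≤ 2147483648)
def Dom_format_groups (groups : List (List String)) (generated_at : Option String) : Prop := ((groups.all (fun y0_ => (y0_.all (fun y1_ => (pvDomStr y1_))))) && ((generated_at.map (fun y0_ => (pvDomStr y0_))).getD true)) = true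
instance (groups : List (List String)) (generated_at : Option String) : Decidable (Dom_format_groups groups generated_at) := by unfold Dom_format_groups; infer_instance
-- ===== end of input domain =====

-- B builds the output BACK-TO-FRONT: it walks the group indices in reverse with a single string
-- accumulator, concatenating each block directly (no line list, no join, no sentinel); objective: alternative.

-- ===== PORT A =====
-- Python truthiness of 'generated_at' (str | None): truthy iff neither None nor "".
def format_groups (groups : List (List String)) (generated_at : Option String) : String :=
  if groups = [] then "No groups generated yet."
  else
    PySem.Str.rstrip (PySem.Str.join "\n"
      ((PySem.List.enumerate groups 1).foldl
        (fun acc p =>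
          (p.2.foldl (fun acc2 s => acc2 ++ ["- " ++ s])
            (acc ++ ["Group " ++ PySem.Int.toStr p.1])) ++ [""])
        (if generated_at.getD "" = "" then []
         else ["Generated: " ++ generated_at.getD "", ""])))

-- ===== PORT B =====
-- for i in range(len(groups)-1, -1, -1): build the block for groups[i] and prepend it.
def format_groups_alt (groups : List (List String)) (generated_at : Option String) : String :=
  if groups = [] then "No groups generated yet."
  else
    let out := (PySem.List.pyRange ((groups.length : Int) - 1) (-1) (-1)).foldl
      (fun out i =>
        let block := (PySem.List.pyGetD groups i []).foldl
          (fun b s => b ++ "\n- " ++ s) ("Group " ++ PySem.Int.toStr (i + 1))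
        if out = "" then block else block ++ "\n\n" ++ out) ""
    let out2 := if generated_at.getD "" = "" then out
                else "Generated: " ++ generated_at.getD "" ++ "\n\n" ++ out
    PySem.Str.rstrip out2

-- ===== PRECONDITION & SPEC =====
def Spec_format_groups (groups : List (List String)) (generated_at : Option String) (out : String) : Prop := out = format_groups_alt groups generated_at
instance (groups : List (List String)) (generated_at : Option String) (out : String) : Decidable (Spec_format_groups groups generated_at out) := by unfold Spec_format_groups; infer_instance

-- ===== CLAIM (what is proved, stated in full; the proofs are below) =====
def Claim_equal_format_groups : Prop := ∀ (groups : List (List String)) (generated_at : Option String), Dom_format_groups groups generated_at → Spec_format_groups groups generated_at (format_groups groups generated_at)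

-- ===== LEMMAS AND PROOFS =====

-- A's per-group line list (Group header, student lines, empty-string sentinel).
def pvGl (p : Int × List String) : List String :=
  (("Group " ++ PySem.Int.toStr p.1) :: p.2.map (fun s => "- " ++ s)) ++ [""]

-- the per-group block string both sides produce
def pvBlk (p : Int × List String) : String :=
  PySem.Str.join "\n" (("Group " ++ PySem.Int.toStr p.1) :: p.2.map (fun s => "- " ++ s))

theorem pvFoldlAppend {α β : Type} (xs : List α) (f : α → β) (acc : List β) :
    xs.foldl (fun a s => a ++ [f s]) acc = acc ++ xs.map f := by
  induction xs generalizing acc with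
  | nil => simp
  | cons x xs ih => simp [ih, List.append_assoc]

theorem pvLinesFlat (es : List (Int × List String)) (acc : List String) :
    es.foldl
      (fun acc p =>
        (p.2.foldl (fun acc2 s => acc2 ++ ["- " ++ s])
          (acc ++ ["Group " ++ PySem.Int.toStr p.1])) ++ [""])
      acc = acc ++ es.flatMap pvGl := by
  induction es generalizing acc with
  | nil => simp
  | cons p es ih =>
    rw [List.foldl_cons, pvFoldlAppend, ih]
    simp [pvGl, List.append_assoc]

-- join over a split of a concatenation of two nonempty lists
theorem pvJoinAppend (sep : List Char) (xs ys : List (List Char))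
    (hx : xs ≠ []) (hy : ys ≠ []) :
    PySem.Chars.join sep (xs ++ ys) =
      PySem.Chars.join sep xs ++ sep ++ PySem.Chars.join sep ys := by
  induction xs with
  | nil => exact absurd rfl hx
  | cons x xs ih =>
    cases xs with
    | nil =>
      cases ys with
      | nil => exact absurd rfl hy
      | cons y ys => simp [PySem.Chars.join_cons_cons, PySem.Chars.join_singleton]
    | cons x' xs' =>
      have := ih (by simp)
      simp only [List.cons_append, PySem.Chars.join_cons_cons] at *
      simp [this, List.append_assoc]

theorem pvJoinSnoc (sep : List Char) (xs ys : List (List Char)) (hy : ys ≠ []) :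
    PySem.Chars.join sep (xs ++ [PySem.Chars.join sep ys]) =
      PySem.Chars.join sep (xs ++ ys) := by
  cases xs with
  | nil => simp [PySem.Chars.join_singleton]
  | cons x xs' =>
    rw [pvJoinAppend sep _ _ (by simp) (by simp),
        pvJoinAppend sep _ _ (by simp) hy, PySem.Chars.join_singleton]

-- join of a block's lines followed by the sentinel "" adds a trailing newline
theorem pvJoinSentinel (core : List (List Char)) (hc : core ≠ []) :
    PySem.Chars.join ['\n'] (core ++ [[]]) = PySem.Chars.join ['\n'] core ++ ['\n'] := by
  rw [pvJoinAppend ['\n'] core [[]] hc (by simp)]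
  simp [PySem.Chars.join_singleton]

theorem pvJoinNl (h : List Char) (l : List (List Char)) :
    PySem.Chars.join ['\n'] (h :: l) = h ++ (l.map (fun c => '\n' :: c)).flatten := by
  induction l generalizing h with
  | nil => simp [PySem.Chars.join_singleton]
  | cons x l ih => rw [PySem.Chars.join_cons_cons, ih x]; simp [List.append_assoc]

theorem pvBlkToList (p : Int × List String) :
    (pvBlk p).toList =
      PySem.Chars.join ['\n']
        ((("Group " ++ PySem.Int.toStr p.1) :: p.2.map (fun s => "- " ++ s)).map String.toList) := by
  simp [pvBlk, PySem.Str.toList_join]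

-- character-level form of a block
theorem pvBlkChars (p : Int × List String) :
    (pvBlk p).toList = ("Group " ++ PySem.Int.toStr p.1).toList
      ++ (p.2.map (fun s => '\n' :: '-' :: ' ' :: s.toList)).flatten := by
  rw [pvBlkToList, List.map_cons, pvJoinNl]
  congr 1
  simp [Function.comp_def]

-- joining one group's A-lines = that group's B-block plus a trailing newline
theorem pvGlJoin (p : Int × List String) :
    PySem.Chars.join ['\n'] ((pvGl p).map String.toList) = (pvBlk p).toList ++ ['\n'] := by
  have hm : (pvGl p).map String.toList =
      ((("Group " ++ PySem.Int.toStr p.1) :: p.2.map (fun s => "- " ++ s)).map String.toList)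
        ++ [[]] := by
    simp [pvGl]
  rw [hm, pvJoinSentinel _ (by simp), pvBlkToList]

-- A's flat lines joined with "\n" = the blocks joined with "\n\n", plus a trailing newline.
theorem pvMain (es : List (Int × List String)) (he : es ≠ []) :
    PySem.Chars.join ['\n'] ((es.flatMap pvGl).map String.toList) =
      PySem.Chars.join ['\n', '\n'] ((es.map pvBlk).map String.toList) ++ ['\n'] := by
  induction es with
  | nil => exact absurd rfl he
  | cons p es ih =>
    cases es with
    | nil =>
      simp only [List.flatMap_cons, List.flatMap_nil, List.append_nil, List.map_cons,
        List.map_nil, PySem.Chars.join_singleton]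
      exact pvGlJoin p
    | cons q es' =>
      have ih' := ih (by simp)
      rw [List.flatMap_cons, List.map_append,
        pvJoinAppend ['\n'] _ _ (by simp [pvGl]) (by simp [pvGl]), pvGlJoin, ih']
      simp only [List.map_cons, PySem.Chars.join_cons_cons]
      simp [List.append_assoc]

-- rstrip absorbs a trailing newline
theorem pvRstripNewline (xs : List Char) :
    PySem.Chars.rstrip (xs ++ ['\n']) = PySem.Chars.rstrip xs := by
  simp [PySem.Chars.rstrip, PySem.Chars.isspace]

theorem pvFlatNe (es : List (Int × List String)) (he : es ≠ []) :
    (es.flatMap pvGl).map String.toList ≠ [] := by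
  cases es with
  | nil => exact absurd rfl he
  | cons p es' => simp [pvGl]

theorem pvStrEqOfToList (s t : String) (h : s.toList = t.toList) : s = t := by
  have := congrArg String.ofList h
  simpa using this

-- B's inner loop building one block by string concatenation
theorem pvBlockFold (g : List String) (base : String) :
    (g.foldl (fun b s => b ++ "\n- " ++ s) base).toList
      = base.toList ++ (g.map (fun s => '\n' :: '-' :: ' ' :: s.toList)).flatten := by
  induction g generalizing base with
  | nil => simp
  | cons s g ih => simp [ih, List.append_assoc]

theorem pvBlockFoldBlk (i : Int) (g : List String) :
    (g.foldl (fun b s => b ++ "\n- " ++ s) ("Group " ++ PySem.Int.toStr i))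
      = pvBlk (i, g) := by
  apply pvStrEqOfToList
  rw [pvBlockFold, pvBlkChars]

theorem pvBlkNe (p : Int × List String) : pvBlk p ≠ "" := by
  intro h
  have := pvBlkChars p
  rw [h] at this
  simp at this

-- take (k+1) adds the block for groups[k] at the end
theorem pvBlocksTake (gs : List (List String)) (k : Nat) (h : k < gs.length) :
    ((PySem.List.enumerate (gs.take (k+1)) 1).map pvBlk).map String.toList
    = ((PySem.List.enumerate (gs.take k) 1).map pvBlk).map String.toList
        ++ [(pvBlk ((k : Int) + 1, gs[k])).toList] := by
  rw [List.take_add_one, List.getElem?_eq_getElem h]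
  rw [show (some gs[k]).toList = [gs[k]] from rfl, PySem.List.enumerate_append]
  simp [PySem.List.enumerate_cons, min_eq_left (le_of_lt h), add_comm]

-- B's outer back-to-front loop = the blocks of the first k groups joined with blank lines
theorem pvBLoop (gs : List (List String)) :
    ∀ (k : Nat), k ≤ gs.length → ∀ (acc : String),
    ((PySem.List.pyRange ((k : Int) - 1) (-1) (-1)).foldl
      (fun out i =>
        let block := (PySem.List.pyGetD gs i []).foldl
          (fun b s => b ++ "\n- " ++ s) ("Group " ++ PySem.Int.toStr (i + 1))
        if out = "" then block else block ++ "\n\n" ++ out) acc).toList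
    = PySem.Chars.join ['\n', '\n']
        (((PySem.List.enumerate (gs.take k) 1).map pvBlk).map String.toList
          ++ (if acc = "" then [] else [acc.toList])) := by
  intro k
  induction k with
  | zero =>
    intro _ acc
    rw [show ((0 : Nat) : Int) - 1 = -1 from rfl,
        PySem.List.pyRange_neg_one_eq_nil le_rfl]
    by_cases ha : acc = ""
    · simp [ha, PySem.Chars.join_nil]
    · simp [ha, PySem.Chars.join_singleton]
  | succ k ih =>
    intro hk acc
    have hklt : k < gs.length := hk
    have hb := pvBlkNe ((k : Int) + 1, gs[k])
    rw [show ((k + 1 : Nat) : Int) - 1 = (k : Int) by push_cast; ring,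
        PySem.List.pyRange_neg_one_cons (by omega : (-1 : Int) < (k : Int)),
        List.foldl_cons]
    have hget : PySem.List.pyGetD gs ((k : Nat) : Int) [] = gs[k] := by
      rw [PySem.List.pyGetD_natCast]
      exact List.getD_eq_getElem _ _ hklt
    rw [ih (le_of_lt hklt)]
    simp only [hget, pvBlockFoldBlk ((k : Int) + 1) gs[k]]
    rw [pvBlocksTake gs k hklt]
    by_cases ha : acc = ""
    · simp [ha, hb]
    · have hne : pvBlk ((k : Int) + 1, gs[k]) ++ "\n\n" ++ acc ≠ "" := by
        intro h
        have := congrArg String.toList h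
        simp [pvBlkChars] at this
      have hcat : (pvBlk ((k : Int) + 1, gs[k]) ++ "\n\n" ++ acc).toList
          = PySem.Chars.join ['\n', '\n']
              [(pvBlk ((k : Int) + 1, gs[k])).toList, acc.toList] := by
        rw [PySem.Chars.join_cons_cons, PySem.Chars.join_singleton]
        simp
      rw [if_neg ha, if_neg hne, hcat, pvJoinSnoc _ _ _ (by simp)]
      simp [ha, List.append_assoc]

-- ===== VERDICT (by name: the statement is the Claim_ definition above) =====
theorem format_groups_spec : Claim_equal_format_groups := by
  intro groups generated_at _
  unfold Spec_format_groups format_groups format_groups_alt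
  by_cases hg : groups = []
  · simp [hg]
  · rw [if_neg hg, if_neg hg]
    have hen : PySem.List.enumerate groups 1 ≠ [] := by
      cases groups with
      | nil => exact absurd rfl hg
      | cons x xs => simp [PySem.List.enumerate_cons]
    set es := PySem.List.enumerate groups 1 with hes
    have hloop := pvBLoop groups groups.length le_rfl ""
    rw [if_pos rfl, List.take_length] at hloop
    simp only [List.append_nil] at hloop
    rw [← hes] at hloop
    apply pvStrEqOfToList
    rw [PySem.Str.toList_rstrip, PySem.Str.toList_rstrip, PySem.Str.toList_join]
    have hmain := pvMain es hen
    have hflat := pvLinesFlat es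
    have hnl : ("\n" : String).toList = ['\n'] := rfl
    by_cases hge : generated_at.getD "" = ""
    · rw [if_pos hge, if_pos hge, hflat [], List.nil_append, hnl, hmain, pvRstripNewline,
        hloop]
    · rw [if_neg hge, if_neg hge, hflat, hnl]
      have hfl := pvFlatNe es hen
      have hsplit : (["Generated: " ++ generated_at.getD "", ""] ++ es.flatMap pvGl).map String.toList =
          ([("Generated: " ++ generated_at.getD "").toList, []] ++ (es.flatMap pvGl).map String.toList) := by
        simp
      rw [hsplit, pvJoinAppend ['\n'] _ _ (by simp) hfl, hmain]
      have hpre : PySem.Chars.join ['\n'] [("Generated: " ++ generated_at.getD "").toList, []] =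
          ("Generated: " ++ generated_at.getD "").toList ++ ['\n'] := by
        rw [PySem.Chars.join_cons_cons, PySem.Chars.join_singleton, List.append_nil]
      rw [hpre]
      have hassoc : (("Generated: " ++ generated_at.getD "").toList ++ ['\n']) ++ ['\n'] ++
          (PySem.Chars.join ['\n', '\n'] ((es.map pvBlk).map String.toList) ++ ['\n']) =
          (("Generated: " ++ generated_at.getD "").toList ++ ['\n', '\n'] ++
            PySem.Chars.join ['\n', '\n'] ((es.map pvBlk).map String.toList)) ++ ['\n'] := by
        simp [List.append_assoc]
      rw [hassoc, pvRstripNewline]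
      simp [hloop, List.append_assoc]
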